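-- pv_equiv track=rewrite | github.com/sparkinghua/lingbo_hax | train/get_bw.py | merge_packets
-- ===== SOURCE A (Python) =====
-- def merge_packets(data):
--     merged_data = []
--     packet_counts = []
--     prev_time = data[0]
--     count = 1
--     for i in range(1, len(data)):
--         if data[i] == prev_time:
--             count += 1
--         else:
--             merged_data.append(prev_time)
--             packet_counts.append(count)
--             prev_time = data[i]
--             count = 1
--     merged_data.append(prev_time)
--     packet_counts.append(count)
--     return merged_data, packet_counts
-- ===== SOURCE B (Python) =====
-- def merge_packets(data):
--     merged_data = []
--     packet_counts = []
--     n = len(data)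
--     i = 0
--     while i < n:
--         j = i + 1
--         while j < n and data[j] == data[i]:
--             j += 1
--         merged_data.append(data[i])
--         packet_counts.append(j - i)
--         i = j
--     return merged_data, packet_counts
-- ===== Notes on version B (the rewrite author's own statement) =====
-- stated objective: alternative
-- what changed: Replaces A's element-wise prev/count state machine (fold over elements, flushing the pending run at each change and once after the loop) by a two-pointer run scanner: an outer loop positioned at each run start and an inner scan that finds the run end, the count coming from index differencing; no trailing flush and no carried prev/count state.
import Mathlib
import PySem

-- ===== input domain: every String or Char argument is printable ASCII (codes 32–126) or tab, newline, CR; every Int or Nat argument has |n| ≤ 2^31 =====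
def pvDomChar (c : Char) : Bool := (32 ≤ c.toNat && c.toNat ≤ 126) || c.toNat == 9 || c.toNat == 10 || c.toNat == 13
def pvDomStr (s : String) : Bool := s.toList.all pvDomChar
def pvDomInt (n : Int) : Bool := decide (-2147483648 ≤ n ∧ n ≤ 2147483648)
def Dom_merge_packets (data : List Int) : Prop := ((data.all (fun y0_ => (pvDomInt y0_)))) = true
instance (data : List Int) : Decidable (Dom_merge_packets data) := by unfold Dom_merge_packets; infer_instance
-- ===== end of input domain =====

-- B replaces A's prev/count accumulator loop by a two-pointer run scan; objective: alternative
-- decomposition (neither version mutates its argument).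

-- ===== PORT A =====
-- A's loop body on the state (merged_data, packet_counts, prev_time, count); x = data[i]
def mpLoop (s : List Int × List Int × Int × Int) (x : Int) : List Int × List Int × Int × Int :=
  if x = s.2.2.1 then (s.1, s.2.1, s.2.2.1, s.2.2.2 + 1)
  else (s.1 ++ [s.2.2.1], s.2.1 ++ [s.2.2.2], x, 1)

def merge_packets (data : List Int) : List Int × List Int :=
  -- first subscript: the IndexError on the empty list is excluded by Pre_; pyGetD's default is never read there
  let prev_time := PySem.List.pyGetD data 0 0
  let s := (PySem.List.pyRange 1 (PySem.List.len data) 1).foldl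
    (fun s i => mpLoop s (PySem.List.pyGetD data i 0)) ([], [], prev_time, 1)
  (s.1 ++ [s.2.2.1], s.2.1 ++ [s.2.2.2])

-- ===== PORT B =====
-- inner while 'while j < n and data[j] == x: j += 1' (x = data[i], fixed during the scan);
-- the fuel argument only makes the loop total: callers pass n - j, enough for every iteration
def mpRunEnd (data : List Int) (x : Int) : Nat → Nat → Nat
  | 0, j => j
  | fuel + 1, j =>
    if j < data.length then
      (if PySem.List.pyGetD data (j : Int) 0 = x then mpRunEnd data x fuel (j + 1) else j)
    else j

-- outer while 'while i < n: …'; fuel n suffices since i strictly increases each iteration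
def mpOuter (data : List Int) : Nat → Nat → List Int → List Int → List Int × List Int
  | 0, _, m, c => (m, c)
  | fuel + 1, i, m, c =>
    if i < data.length then
      let j := mpRunEnd data (PySem.List.pyGetD data (i : Int) 0) (data.length - (i + 1)) (i + 1)
      mpOuter data fuel j (m ++ [PySem.List.pyGetD data (i : Int) 0]) (c ++ [(j : Int) - (i : Int)])
    else (m, c)

def merge_packets_alt (data : List Int) : List Int × List Int :=
  mpOuter data data.length 0 [] []

-- ===== PRECONDITION & SPEC =====
-- Pre_ excludes exactly the empty list, on which A raises IndexError at its first subscript.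
def Pre_merge_packets (data : List Int) : Prop := data ≠ []
instance (data : List Int) : Decidable (Pre_merge_packets data) := by unfold Pre_merge_packets; infer_instance
def pvWitness_merge_packets : List Int := [3, 3, 5, 3, 3, 3, 7]

def Spec_merge_packets (data : List Int) (out : List Int × List Int) : Prop := out = merge_packets_alt data
instance (data : List Int) (out : List Int × List Int) : Decidable (Spec_merge_packets data out) := by unfold Spec_merge_packets; infer_instance

-- ===== CLAIM (what is proved, stated in full; the proofs are below) =====
def Claim_equal_merge_packets : Prop := ∀ (data : List Int), Dom_merge_packets data → Pre_merge_packets data → Spec_merge_packets data (merge_packets data)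

-- ===== LEMMAS AND PROOFS =====

-- length of the initial run of x
def pvRunLen (x : Int) : List Int → Nat
  | [] => 0
  | y :: ys => if y = x then pvRunLen x ys + 1 else 0

theorem pvRunLen_le (x : Int) (l : List Int) : pvRunLen x l ≤ l.length := by
  induction l with
  | nil => simp [pvRunLen]
  | cons y ys ih => simp only [pvRunLen, List.length_cons]; split <;> omega

-- reference run-length encoding, one recursion step per run
def pvRuns : List Int → List Int × List Int
  | [] => ([], [])
  | x :: xs =>
    let p := pvRuns (xs.drop (pvRunLen x xs))
    (x :: p.1, ((pvRunLen x xs : Int) + 1) :: p.2)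
termination_by l => l.length
decreasing_by
  have := pvRunLen_le x xs
  simp

theorem pvRuns_nil : pvRuns [] = ([], []) := by rw [pvRuns.eq_def]

theorem pvRuns_cons (x : Int) (xs : List Int) : pvRuns (x :: xs) =
    (x :: (pvRuns (xs.drop (pvRunLen x xs))).1,
     ((pvRunLen x xs : Int) + 1) :: (pvRuns (xs.drop (pvRunLen x xs))).2) := by
  rw [pvRuns.eq_def]

-- A's loop together with its final flush, as a recursion on the tail
def pvG (prev cnt : Int) : List Int → List Int × List Int
  | [] => ([prev], [cnt])
  | y :: ys =>
    if y = prev then pvG prev (cnt + 1) ys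
    else ((pvG y 1 ys).1.cons prev, (pvG y 1 ys).2.cons cnt)

theorem pvG_foldA (rest : List Int) : ∀ (a1 a2 : List Int) (prev cnt : Int),
    ((rest.foldl mpLoop (a1, a2, prev, cnt)).1 ++ [(rest.foldl mpLoop (a1, a2, prev, cnt)).2.2.1],
     (rest.foldl mpLoop (a1, a2, prev, cnt)).2.1 ++ [(rest.foldl mpLoop (a1, a2, prev, cnt)).2.2.2])
      = (a1 ++ (pvG prev cnt rest).1, a2 ++ (pvG prev cnt rest).2) := by
  induction rest with
  | nil => intro a1 a2 prev cnt; simp [pvG]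
  | cons y ys ih =>
    intro a1 a2 prev cnt
    by_cases h : y = prev
    · simpa [mpLoop, h, pvG] using ih a1 a2 prev (cnt + 1)
    · simpa [mpLoop, h, pvG] using ih (a1 ++ [prev]) (a2 ++ [cnt]) y 1

theorem pvG_eq_runs (rest : List Int) : ∀ (prev cnt : Int),
    pvG prev cnt rest
      = (prev :: (pvRuns (rest.drop (pvRunLen prev rest))).1,
         (cnt + (pvRunLen prev rest : Int)) :: (pvRuns (rest.drop (pvRunLen prev rest))).2) := by
  induction rest with
  | nil => intro prev cnt; simp [pvG, pvRunLen, pvRuns_nil]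
  | cons y ys ih =>
    intro prev cnt
    by_cases h : y = prev
    · subst h
      have h1 : pvG y cnt (y :: ys) = pvG y (cnt + 1) ys := by simp [pvG]
      have h2 : pvRunLen y (y :: ys) = pvRunLen y ys + 1 := by simp [pvRunLen]
      rw [h1, ih y (cnt + 1), h2, List.drop_succ_cons]
      have : cnt + 1 + (pvRunLen y ys : Int) = cnt + ((pvRunLen y ys : Int) + 1) := by ring
      rw [this]; push_cast; ring_nf
    · have h1 : pvG prev cnt (y :: ys) = (prev :: (pvG y 1 ys).1, cnt :: (pvG y 1 ys).2) := by
        simp [pvG, h]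
      have h2 : pvRunLen prev (y :: ys) = 0 := by simp [pvRunLen, h]
      rw [h1, ih y 1, h2, List.drop_zero, pvRuns_cons]
      have : (1 : Int) + (pvRunLen y ys : Int) = (pvRunLen y ys : Int) + 1 := by ring
      rw [this]; simp

theorem mpRunEnd_eq (data : List Int) (x : Int) : ∀ (fuel j : Nat), data.length ≤ j + fuel →
    mpRunEnd data x fuel j = j + pvRunLen x (data.drop j) := by
  intro fuel
  induction fuel with
  | zero =>
    intro j hj
    have : data.drop j = [] := List.drop_eq_nil_of_le (by omega)
    simp [mpRunEnd, this, pvRunLen]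
  | succ k ih =>
    intro j hj
    by_cases h : j < data.length
    · have hd : data.drop j = data[j] :: data.drop (j + 1) := List.drop_eq_getElem_cons h
      have hg : PySem.List.pyGetD data (j : Int) 0 = data[j] := by
        rw [PySem.List.pyGetD_eq_getElem] <;> simp [h]
      by_cases hx : data[j] = x
      · rw [show mpRunEnd data x (k + 1) j = mpRunEnd data x k (j + 1) from by
          simp [mpRunEnd, h, hg, hx]]
        rw [ih (j + 1) (by omega), hd]
        simp [pvRunLen, hx]; omega
      · rw [show mpRunEnd data x (k + 1) j = j from by simp [mpRunEnd, h, hg, hx]]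
        rw [hd]; simp [pvRunLen, hx]
    · have : data.drop j = [] := List.drop_eq_nil_of_le (by omega)
      simp [mpRunEnd, h, this, pvRunLen]

theorem mpOuter_eq (data : List Int) : ∀ (fuel i : Nat) (m c : List Int), data.length ≤ i + fuel →
    mpOuter data fuel i m c = (m ++ (pvRuns (data.drop i)).1, c ++ (pvRuns (data.drop i)).2) := by
  intro fuel
  induction fuel with
  | zero =>
    intro i m c hi
    have : data.drop i = [] := List.drop_eq_nil_of_le (by omega)
    simp [mpOuter, this, pvRuns_nil]
  | succ k ih =>
    intro i m c hi
    by_cases h : i < data.length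
    · have hd : data.drop i = data[i] :: data.drop (i + 1) := List.drop_eq_getElem_cons h
      have hg : PySem.List.pyGetD data (i : Int) 0 = data[i] := by
        rw [PySem.List.pyGetD_eq_getElem] <;> simp [h]
      have hrl := pvRunLen_le data[i] (data.drop (i + 1))
      have hlen : (data.drop (i + 1)).length = data.length - (i + 1) := by simp
      have hj : mpRunEnd data data[i] (data.length - (i + 1)) (i + 1)
          = i + 1 + pvRunLen data[i] (data.drop (i + 1)) :=
        mpRunEnd_eq data data[i] (data.length - (i + 1)) (i + 1) (by omega)
      rw [show mpOuter data (k + 1) i m c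
          = mpOuter data k (mpRunEnd data data[i] (data.length - (i + 1)) (i + 1))
              (m ++ [data[i]])
              (c ++ [((mpRunEnd data data[i] (data.length - (i + 1)) (i + 1) : Int)) - (i : Int)])
          from by simp [mpOuter, h, hg]]
      rw [hj, ih _ _ _ (by omega)]
      have hdrop : data.drop (i + 1 + pvRunLen data[i] (data.drop (i + 1)))
          = (data.drop (i + 1)).drop (pvRunLen data[i] (data.drop (i + 1))) := by
        rw [Nat.add_comm (i + 1), List.drop_drop, Nat.add_comm]
      have hcnt : ((i + 1 + pvRunLen data[i] (data.drop (i + 1)) : Nat) : Int) - (i : Int)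
          = ((pvRunLen data[i] (data.drop (i + 1)) : Int) + 1) := by push_cast; ring
      rw [hdrop, hcnt, hd, pvRuns_cons]
      simp
    · have : data.drop i = [] := List.drop_eq_nil_of_le (by omega)
      simp [mpOuter, h, this, pvRuns_nil]

theorem alt_eq_runs (data : List Int) : merge_packets_alt data = pvRuns data := by
  have := mpOuter_eq data data.length 0 [] [] (by omega)
  simpa [merge_packets_alt] using this

-- ===== VERDICT (by name: the statement is the Claim_ definition above) =====
theorem merge_packets_spec : Claim_equal_merge_packets := by
  intro data _hdom hpre
  unfold Spec_merge_packets
  match data, hpre with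
  | x :: rest, _ =>
    rw [alt_eq_runs]
    simp only [merge_packets, PySem.List.len_eq]
    rw [PySem.List.foldl_pyRange_pyGetD' (x :: rest) 0
      (fun s x => mpLoop s x) ([], [], PySem.List.pyGetD (x :: rest) 0 0, 1) (by omega : (0:Int) ≤ 1)]
    simp only [Int.toNat_one, List.drop_one, List.tail_cons, PySem.List.pyGetD_zero_cons]
    rw [pvG_foldA rest [] [] x 1, pvG_eq_runs rest x 1, pvRuns_cons]
    simp [add_comm]
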